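-- pv_equiv track=rewrite | github.com/LP-RG/subxpat | translator_to_forallZ3.py | generate_tree_order_constraints_for_redundancy
-- ===== SOURCE A (Python) =====
-- from typing import Iterable, List, Callable, Any, Union, Tuple
-- from itertools import repeat, islice
--
-- def generate_and_join(function: Callable[..., Iterable[str]],
--                       ranges: List[Union[int, Iterable]],
--                       joiner: str,
--                       __internal: List[int] = []) -> str:
--     """
--     Args:
--         function (Callable[..., str]): it must take in one argument per element in ranges.\
--             If 'ranges' contains iterables then the function needs 2 arguments for that (index, value).
--     """
--
--     strings = []
--
--     if len(ranges) == 1: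
--         # end case
--         if type(ranges[0]) is int:
--             for i in range(ranges[0]):
--                 strings.extend(function(*__internal, i))
--         else:
--             for i, v in enumerate(ranges[0]):
--                 strings.extend(function(*__internal, i, v))
--
--     else:
--         # middle case
--         if type(ranges[0]) is int:
--             for i in range(ranges[0]):
--                 strings.append(generate_and_join(function, ranges[1:], joiner, __internal + [i]))
--         else:
--             for i, v in enumerate(ranges[0]):
--                 strings.append(generate_and_join(function, ranges[1:], joiner, __internal + [i, v]))
--
--     return joiner.join(strings)
--
-- def generate_tree_order_constraints_for_redundancy(inputs_count: int,
--                                                    trees_per_output: int,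
--                                                    outputs_count: int) -> str:
--     if trees_per_output == 1:
--         return "True"
--
--     def generator(_0, o_id, _1, t_id, i_id):
--         n = i_id * 2
--         p_s = f"IntVal({2 ** n}) * p_o{o_id}_t{t_id}_i{i_id}_s"
--         p_l = f"IntVal({2 ** (n+1)}) * p_o{o_id}_t{t_id}_i{i_id}_l"
--         return [p_s, p_l]
--
--     constraints = []
--     for o_id in range(outputs_count):
--         trees = []
--         for t_id in range(trees_per_output):
--             trees.append(generate_and_join(generator, [[o_id], [t_id], inputs_count], ' + '))
--
--         for tree1, tree2 in zip(trees, islice(trees, 1, None)):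
--             # every tree must be greater or equal than the next one (per output)
--             constraints.append(f"({tree1}) >= ({tree2})")
--
--     return ",\n".join(constraints)
-- ===== SOURCE B (Python) =====
-- def generate_tree_order_constraints_for_redundancy(inputs_count: int,
--                                                    trees_per_output: int,
--                                                    outputs_count: int) -> str:
--     if trees_per_output == 1:
--         return "True"
--
--     def tree(o_id: int, t_id: int) -> str:
--         return " + ".join(
--             f"IntVal({w * 4 ** i}) * p_o{o_id}_t{t_id}_i{i}_{tag}"
--             for i in range(inputs_count)
--             for w, tag in ((1, "s"), (2, "l")))
--
--     return ",\n".join(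
--         f"({tree(o_id, t_id - 1)}) >= ({tree(o_id, t_id)})"
--         for o_id in range(outputs_count)
--         for t_id in range(1, trees_per_output))
-- ===== Notes on version B (the rewrite author's own statement) =====
-- stated objective: simpler
-- what changed: Drops the generic recursive generate_and_join helper and the intermediate trees list + zip: B builds each tree string with one flat comprehension over (input, weight/tag) using weights w * 4**i, and pairs consecutive trees by index t-1/t in a single comprehension.
import Mathlib
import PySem

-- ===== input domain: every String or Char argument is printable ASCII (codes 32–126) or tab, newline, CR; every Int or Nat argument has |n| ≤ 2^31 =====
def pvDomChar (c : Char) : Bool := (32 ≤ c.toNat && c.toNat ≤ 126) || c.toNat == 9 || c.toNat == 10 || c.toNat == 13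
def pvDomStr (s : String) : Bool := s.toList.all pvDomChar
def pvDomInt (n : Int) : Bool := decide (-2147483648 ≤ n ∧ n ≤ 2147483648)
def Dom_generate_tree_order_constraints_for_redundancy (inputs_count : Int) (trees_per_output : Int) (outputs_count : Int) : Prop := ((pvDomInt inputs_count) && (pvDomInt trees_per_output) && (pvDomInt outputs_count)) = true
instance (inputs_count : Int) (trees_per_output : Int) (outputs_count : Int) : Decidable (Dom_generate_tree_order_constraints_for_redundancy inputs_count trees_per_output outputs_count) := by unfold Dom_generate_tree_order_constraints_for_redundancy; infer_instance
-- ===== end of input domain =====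

-- B replaces A's generic recursive generate_and_join helper and intermediate trees/zip lists by
-- direct comprehensions over (output, tree-index, input) with the weights written as w * 4**i
-- (objective: simpler).

-- ===== PORT A =====

-- Python's local 'generator(_0, o_id, _1, t_id, i_id)'; 2 ** n ported as 2 ^ n.toNat — exact since
-- every call site passes i_id from range(...), so n = i_id * 2 ≥ 0.
def pvA_generator (_x : Int) (o_id : Int) (_y : Int) (t_id : Int) (i_id : Int) : List String :=
  let n := i_id * 2
  let p_s := "IntVal(" ++ PySem.Int.toStr (2 ^ n.toNat) ++ ") * p_o" ++ PySem.Int.toStr o_id ++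
             "_t" ++ PySem.Int.toStr t_id ++ "_i" ++ PySem.Int.toStr i_id ++ "_s"
  let p_l := "IntVal(" ++ PySem.Int.toStr (2 ^ (n.toNat + 1)) ++ ") * p_o" ++ PySem.Int.toStr o_id ++
             "_t" ++ PySem.Int.toStr t_id ++ "_i" ++ PySem.Int.toStr i_id ++ "_l"
  [p_s, p_l]

-- generate_and_join(generator, [[o_id], [t_id], inputs_count], ' + '), ported by hand level by
-- level (Lean cannot type the heterogeneous 'ranges' list): the generic recursion unfolds at this
-- call into exactly these three specialisations, each keeping its own 'strings' accumulator and
-- join; __internal is [], then [0, o_id], then [0, o_id, 0, t_id].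

-- end case: ranges = [inputs_count] (an int), __internal = [i0, o_id, i1, t_id]
def pvA_gaj_end (i0 o_id i1 t_id : Int) (n : Int) (joiner : String) : String :=
  PySem.Str.join joiner
    ((PySem.List.pyRange 0 n 1).foldl (fun strings i => strings ++ pvA_generator i0 o_id i1 t_id i) [])

-- middle case: ranges = [[t_id], inputs_count], __internal = [i0, o_id]
def pvA_gaj_mid2 (i0 o_id : Int) (r : List Int) (n : Int) (joiner : String) : String :=
  PySem.Str.join joiner
    ((PySem.List.enumerate r 0).foldl
      (fun strings iv => strings ++ [pvA_gaj_end i0 o_id iv.1 iv.2 n joiner]) [])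

-- middle case: ranges = [[o_id], [t_id], inputs_count], __internal = []
def pvA_gaj_mid1 (r1 r2 : List Int) (n : Int) (joiner : String) : String :=
  PySem.Str.join joiner
    ((PySem.List.enumerate r1 0).foldl
      (fun strings iv => strings ++ [pvA_gaj_mid2 iv.1 iv.2 r2 n joiner]) [])

def generate_tree_order_constraints_for_redundancy (inputs_count : Int) (trees_per_output : Int) (outputs_count : Int) : String :=
  if trees_per_output = 1 then "True"
  else
    let constraints :=
      (PySem.List.pyRange 0 outputs_count 1).foldl (fun constraints o_id =>
        let trees :=
          (PySem.List.pyRange 0 trees_per_output 1).foldl (fun trees t_id =>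
            trees ++ [pvA_gaj_mid1 [o_id] [t_id] inputs_count " + "]) []
        -- zip(trees, islice(trees, 1, None)) = trees.zip (trees.drop 1)
        (trees.zip (trees.drop 1)).foldl (fun constraints p =>
          constraints ++ ["(" ++ p.1 ++ ") >= (" ++ p.2 ++ ")"]) constraints) []
    PySem.Str.join ",\n" constraints

-- ===== PORT B =====

-- Source B's local 'tree(o_id, t_id)'; 4 ** i ported as 4 ^ i.toNat — exact since i comes from range(...)
def pvB_tree (inputs_count o_id t_id : Int) : String :=
  PySem.Str.join " + "
    ((PySem.List.pyRange 0 inputs_count 1).flatMap (fun i =>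
      [((1 : Int), "s"), (2, "l")].map (fun wt =>
        "IntVal(" ++ PySem.Int.toStr (wt.1 * 4 ^ i.toNat) ++ ") * p_o" ++ PySem.Int.toStr o_id ++
        "_t" ++ PySem.Int.toStr t_id ++ "_i" ++ PySem.Int.toStr i ++ "_" ++ wt.2)))

def generate_tree_order_constraints_for_redundancy_alt (inputs_count : Int) (trees_per_output : Int) (outputs_count : Int) : String :=
  if trees_per_output = 1 then "True"
  else
    PySem.Str.join ",\n"
      ((PySem.List.pyRange 0 outputs_count 1).flatMap (fun o_id =>
        (PySem.List.pyRange 1 trees_per_output 1).map (fun t_id =>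
          "(" ++ pvB_tree inputs_count o_id (t_id - 1) ++ ") >= (" ++ pvB_tree inputs_count o_id t_id ++ ")")))

-- ===== PRECONDITION & SPEC =====
def Spec_generate_tree_order_constraints_for_redundancy (inputs_count : Int) (trees_per_output : Int) (outputs_count : Int) (out : String) : Prop := out = generate_tree_order_constraints_for_redundancy_alt inputs_count trees_per_output outputs_count
instance (inputs_count : Int) (trees_per_output : Int) (outputs_count : Int) (out : String) : Decidable (Spec_generate_tree_order_constraints_for_redundancy inputs_count trees_per_output outputs_count out) := by unfold Spec_generate_tree_order_constraints_for_redundancy; infer_instance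

-- ===== CLAIM (what is proved, stated in full; the proofs are below) =====
def Claim_equal_generate_tree_order_constraints_for_redundancy : Prop := ∀ (inputs_count : Int) (trees_per_output : Int) (outputs_count : Int), Dom_generate_tree_order_constraints_for_redundancy inputs_count trees_per_output outputs_count → Spec_generate_tree_order_constraints_for_redundancy inputs_count trees_per_output outputs_count (generate_tree_order_constraints_for_redundancy inputs_count trees_per_output outputs_count)

-- ===== LEMMAS AND PROOFS =====

-- 2 ** (2i) and 2 ** (2i+1) versus 1 * 4 ** i and 2 * 4 ** i (both sides clamp alike at i < 0)
theorem pv_pow_s (i : Int) : (2 : Int) ^ (i * 2).toNat = 1 * 4 ^ i.toNat := by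
  rcases le_or_gt 0 i with h | h
  · have h2 : (i * 2).toNat = 2 * i.toNat := by omega
    rw [h2, pow_mul]; ring
  · have h1 : (i * 2).toNat = 0 := by omega
    have h2 : i.toNat = 0 := by omega
    rw [h1, h2]; ring

theorem pv_pow_l (i : Int) : (2 : Int) ^ ((i * 2).toNat + 1) = 2 * 4 ^ i.toNat := by
  rw [pow_succ, pv_pow_s i]; ring

-- the per-(o,t,i) summands agree
theorem pv_generator_eq (o_id t_id i : Int) :
    pvA_generator 0 o_id 0 t_id i =
      [((1 : Int), "s"), (2, "l")].map (fun wt =>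
        "IntVal(" ++ PySem.Int.toStr (wt.1 * 4 ^ i.toNat) ++ ") * p_o" ++ PySem.Int.toStr o_id ++
        "_t" ++ PySem.Int.toStr t_id ++ "_i" ++ PySem.Int.toStr i ++ "_" ++ wt.2) := by
  simp only [pvA_generator, List.map]
  rw [pv_pow_s i, pv_pow_l i]
  simp [String.append_assoc]

theorem pv_join_singleton (j s : String) : PySem.Str.join j [s] = s := by
  simp [PySem.Str.join]

-- A's tree string (through the specialised generate_and_join) is B's tree string
theorem pv_tree_eq (n o_id t_id : Int) :
    pvA_gaj_mid1 [o_id] [t_id] n " + " = pvB_tree n o_id t_id := by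
  simp only [pvA_gaj_mid1, pvA_gaj_mid2, PySem.List.enumerate, List.foldl_cons, List.foldl_nil,
    List.nil_append]
  rw [pv_join_singleton, pv_join_singleton]
  simp only [pvA_gaj_end, pvB_tree]
  congr 1
  rw [PySem.List.foldl_append_eq_flatMap]
  simp only [List.nil_append]
  exact List.flatMap_congr fun i _ => pv_generator_eq o_id t_id i

-- consecutive pairs of [f a, f (a+1), ..., f (b-1)] are [(f (t-1), f t) for t in range(a+1, b)]
theorem pv_zip_consec_aux (f : Int → String) (k : Nat) : ∀ a : Int,
    (((PySem.List.pyRange a (a + 1 + k) 1).map f).zip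
        (((PySem.List.pyRange a (a + 1 + k) 1).map f).drop 1))
      = (PySem.List.pyRange (a + 1) (a + 1 + k) 1).map (fun t => (f (t - 1), f t)) := by
  induction k with
  | zero =>
    intro a
    rw [show a + 1 + ((0 : Nat) : Int) = a + 1 by omega, PySem.List.pyRange_one_singleton,
      PySem.List.pyRange_one_eq_nil le_rfl]
    simp
  | succ m ih =>
    intro a
    have e1 : PySem.List.pyRange a (a + 1 + ((m + 1 : Nat) : Int)) 1
        = a :: PySem.List.pyRange (a + 1) (a + 1 + ((m + 1 : Nat) : Int)) 1 :=
      PySem.List.pyRange_one_cons (by push_cast; omega)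
    have e2 : PySem.List.pyRange (a + 1) (a + 1 + ((m + 1 : Nat) : Int)) 1
        = (a + 1) :: PySem.List.pyRange (a + 1 + 1) (a + 1 + ((m + 1 : Nat) : Int)) 1 :=
      PySem.List.pyRange_one_cons (by push_cast; omega)
    have ih' := ih (a + 1)
    rw [show a + 1 + 1 + ((m : Nat) : Int) = a + 1 + ((m + 1 : Nat) : Int) by push_cast; omega]
      at ih'
    rw [e2] at ih'
    simp only [List.map_cons, List.drop_succ_cons, List.drop_zero] at ih'
    rw [e1, e2]
    simp only [List.map_cons, List.drop_succ_cons, List.drop_zero, List.zip_cons_cons]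
    rw [ih', show a + 1 - 1 = a by omega]

theorem pv_zip_consec (f : Int → String) (a b : Int) :
    (((PySem.List.pyRange a b 1).map f).zip (((PySem.List.pyRange a b 1).map f).drop 1))
      = (PySem.List.pyRange (a + 1) b 1).map (fun t => (f (t - 1), f t)) := by
  by_cases hab : b ≤ a
  · rw [PySem.List.pyRange_one_eq_nil hab, PySem.List.pyRange_one_eq_nil (by omega)]
    simp
  · have hb : b = a + 1 + ((b - a - 1).toNat : Int) := by omega
    rw [hb]
    exact pv_zip_consec_aux f (b - a - 1).toNat a

theorem generate_tree_order_constraints_for_redundancy_eq (ic tpo oc : Int) :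
    generate_tree_order_constraints_for_redundancy ic tpo oc
      = generate_tree_order_constraints_for_redundancy_alt ic tpo oc := by
  unfold generate_tree_order_constraints_for_redundancy generate_tree_order_constraints_for_redundancy_alt
  by_cases h1 : tpo = 1
  · simp [h1]
  · simp only [h1, if_false]
    congr 1
    have hbody : (fun (constraints : List String) (o_id : Int) =>
          (((PySem.List.pyRange 0 tpo 1).foldl (fun trees t_id =>
                trees ++ [pvA_gaj_mid1 [o_id] [t_id] ic " + "]) []).zip
            (((PySem.List.pyRange 0 tpo 1).foldl (fun trees t_id =>
                trees ++ [pvA_gaj_mid1 [o_id] [t_id] ic " + "]) []).drop 1)).foldl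
            (fun constraints p => constraints ++ ["(" ++ p.1 ++ ") >= (" ++ p.2 ++ ")"]) constraints)
        = fun (constraints : List String) (o_id : Int) => constraints ++
            (PySem.List.pyRange 1 tpo 1).map (fun t_id =>
              "(" ++ pvB_tree ic o_id (t_id - 1) ++ ") >= (" ++ pvB_tree ic o_id t_id ++ ")") := by
      funext constraints o_id
      have htrees : (PySem.List.pyRange 0 tpo 1).foldl (fun trees t_id =>
            trees ++ [pvA_gaj_mid1 [o_id] [t_id] ic " + "]) []
          = (PySem.List.pyRange 0 tpo 1).map (fun t_id => pvB_tree ic o_id t_id) := by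
        rw [PySem.List.foldl_append_singleton_eq_map]
        simp only [List.nil_append]
        exact List.map_congr_left fun t_id _ => pv_tree_eq ic o_id t_id
      rw [htrees, pv_zip_consec (fun t_id => pvB_tree ic o_id t_id) 0 tpo,
        PySem.List.foldl_append_singleton_eq_map, show (0 : Int) + 1 = 1 by omega, List.map_map]
      rfl
    rw [hbody, PySem.List.foldl_append_eq_flatMap]
    simp only [List.nil_append]

-- ===== VERDICT (by name: the statement is the Claim_ definition above) =====
theorem generate_tree_order_constraints_for_redundancy_spec : Claim_equal_generate_tree_order_constraints_for_redundancy := by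
  intro ic tpo oc _hd
  unfold Spec_generate_tree_order_constraints_for_redundancy
  exact generate_tree_order_constraints_for_redundancy_eq ic tpo oc
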